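-- pv_equiv track=rewrite | github.com/badboj40/advent-of-code | 2023/11.py | parse
-- ===== SOURCE A (Python) =====
-- def parse(indata):
--     coords = []
--     for y, row in enumerate(indata):
--         for x, tile in enumerate(row):
--             if tile == "#":
--                 coords.append((x, y))
--
--     rows = [i for i, row in enumerate(indata) if "#" not in row]
--     cols = [i for i, col in enumerate(zip(*indata)) if "#" not in col]
--
--     return coords, rows, cols
-- ===== SOURCE B (Python) =====
-- def parse(indata):
--     coords = []
--     rows = []
--     empty_cols = set(range(len(indata[0]))) if indata else set()
--     for y, row in enumerate(indata):
--         row_has_galaxy = False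
--         for x, tile in enumerate(row):
--             if tile == "#":
--                 coords.append((x, y))
--                 row_has_galaxy = True
--         if not row_has_galaxy:
--             rows.append(y)
--         empty_cols &= {x for x, tile in enumerate(row) if tile != "#"}
--     cols = sorted(empty_cols)
--     return coords, rows, cols
-- ===== Notes on version B (the rewrite author's own statement) =====
-- stated objective: simpler
-- what changed: B makes one pass over the grid collecting coords, flagging empty rows, and intersecting per-row empty-column index sets (then sorts the surviving set), instead of A's three separate passes including a zip(*indata) transpose.
import Mathlib
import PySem

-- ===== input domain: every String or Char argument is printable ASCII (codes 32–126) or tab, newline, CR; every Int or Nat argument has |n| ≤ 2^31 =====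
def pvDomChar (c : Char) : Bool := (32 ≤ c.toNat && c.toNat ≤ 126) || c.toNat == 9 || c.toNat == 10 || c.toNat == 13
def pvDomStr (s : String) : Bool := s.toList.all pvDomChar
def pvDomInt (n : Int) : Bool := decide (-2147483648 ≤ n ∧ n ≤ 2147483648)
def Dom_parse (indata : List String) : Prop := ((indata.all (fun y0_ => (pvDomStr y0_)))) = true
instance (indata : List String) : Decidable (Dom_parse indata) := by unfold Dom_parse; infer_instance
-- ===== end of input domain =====

-- B replaces A's three passes (coord scan, per-row substring scan, zip(*indata) transpose scan) by one
-- pass that collects coords, flags empty rows, and intersects per-row empty-column sets; objective: simpler.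

-- ===== PORT A =====
-- hand port of the builtin zip(*rows): truncates to the shortest row; getD's default is never
-- used since i < every row's length, so this is exact
def zipStar (rows : List (List Char)) : List (List Char) :=
  match rows with
  | [] => []
  | r0 :: rest =>
    let w := rest.foldl (fun m r => min m r.length) r0.length
    (List.range w).map (fun i => (r0 :: rest).map (fun r => r.getD i ' '))

-- the inner 'for x, tile in enumerate(row)' loop of A
def aRow (y : Int) (acc : List (Int × Int)) (row : List Char) : List (Int × Int) :=
  (PySem.List.enumerate row 0).foldl (fun acc2 q => if q.2 = '#' then acc2 ++ [(q.1, y)] else acc2) acc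

def parse (indata : List String) : (List (Int × Int)) × List Int × List Int :=
  let coords := (PySem.List.enumerate indata 0).foldl (fun acc p => aRow p.1 acc p.2.toList) []
  let rows := ((PySem.List.enumerate indata 0).filter
      (fun p => !(PySem.Str.isIn "#" p.2))).map (fun p => p.1)
  let cols := ((PySem.List.enumerate (zipStar (indata.map String.toList)) 0).filter
      (fun p => !(p.2.contains '#'))).map (fun p => p.1)
  (coords, rows, cols)

-- ===== PORT B =====
-- the set comprehension {x for x, tile in enumerate(row) if tile != "#"}
def bRowSet (row : List Char) : PySem.Set Int :=
  (PySem.List.enumerate row 0).foldl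
    (fun s q => if q.2 ≠ '#' then PySem.Set.add s q.1 else s) PySem.Set.empty

-- body of B's inner loop: state (coords, row_has_galaxy)
def bCell (y : Int) (st : List (Int × Int) × Bool) (q : Int × Char) : List (Int × Int) × Bool :=
  if q.2 = '#' then (st.1 ++ [(q.1, y)], true) else st

-- loop state of B's single pass: (coords, rows, empty_cols)
abbrev BSt := List (Int × Int) × List Int × PySem.Set Int

-- body of B's outer loop over 'y, row in enumerate(indata)'
def bRow (st : BSt) (p : Int × String) : BSt :=
  let inner := (PySem.List.enumerate p.2.toList 0).foldl (bCell p.1) (st.1, false)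
  (inner.1,
   (if inner.2 then st.2.1 else st.2.1 ++ [p.1]),
   PySem.Set.inter st.2.2 (bRowSet p.2.toList))

def parse_alt (indata : List String) : (List (Int × Int)) × List Int × List Int :=
  let init : PySem.Set Int := match indata with
    | [] => PySem.Set.empty
    | r0 :: _ => PySem.Set.ofList (PySem.List.pyRange 0 (PySem.Str.len r0) 1)
  let st := (PySem.List.enumerate indata 0).foldl bRow ([], [], init)
  (st.1, st.2.1, PySem.List.sorted st.2.2 (fun x => x) false)

-- ===== PRECONDITION & SPEC =====
def Spec_parse (indata : List String) (out : (List (Int × Int)) × List Int × List Int) : Prop := out = parse_alt indata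
instance (indata : List String) (out : (List (Int × Int)) × List Int × List Int) : Decidable (Spec_parse indata out) := by unfold Spec_parse; infer_instance

-- ===== CLAIM (what is proved, stated in full; the proofs are below) =====
def Claim_equal_parse : Prop := ∀ (indata : List String), Dom_parse indata → Spec_parse indata (parse indata)

-- ===== LEMMAS AND PROOFS =====

-- first component of B's inner loop is A's coordinate accumulation
lemma bCell_foldl_fst (y : Int) (row : List Char) : ∀ (s : Int) (cs : List (Int × Int)) (b : Bool),
    ((PySem.List.enumerate row s).foldl (bCell y) (cs, b)).1
      = (PySem.List.enumerate row s).foldl (fun acc q => if q.2 = '#' then acc ++ [(q.1, y)] else acc) cs := by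
  induction row with
  | nil => intro s cs b; simp [PySem.List.enumerate_nil]
  | cons c cs' ih =>
    intro s cs b
    simp only [PySem.List.enumerate_cons, List.foldl_cons]
    by_cases h : c = '#' <;> simp [bCell, h, ih]

-- second component of B's inner loop: the row_has_galaxy flag
lemma bCell_foldl_snd (y : Int) (row : List Char) : ∀ (s : Int) (cs : List (Int × Int)) (b : Bool),
    ((PySem.List.enumerate row s).foldl (bCell y) (cs, b)).2 = (b || row.any (· == '#')) := by
  induction row with
  | nil => intro s cs b; simp [PySem.List.enumerate_nil]
  | cons c cs' ih =>
    intro s cs b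
    simp only [PySem.List.enumerate_cons, List.foldl_cons]
    by_cases h : c = '#'
    · simp [bCell, h, ih]
    · have hb : (c == '#') = false := by simpa using h
      simp [bCell, h, ih, hb]

-- B's outer loop produces A's coordinate list in its first component
lemma bGrid_fst (l : List String) : ∀ (s : Int) (st : BSt),
    ((PySem.List.enumerate l s).foldl bRow st).1
      = (PySem.List.enumerate l s).foldl (fun acc p => aRow p.1 acc p.2.toList) st.1 := by
  induction l with
  | nil => intro s st; simp [PySem.List.enumerate_nil]
  | cons r rs ih =>
    intro s st
    simp only [PySem.List.enumerate_cons, List.foldl_cons]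
    rw [ih]
    congr 1
    rw [bRow]
    simp only
    rw [bCell_foldl_fst]
    rfl

-- "#" in s  ↔  the character '#' occurs in s
lemma singleton_infix {α : Type} (a : α) (l : List α) : [a] <:+: l ↔ a ∈ l := by
  constructor
  · intro h; exact List.singleton_sublist.1 h.sublist
  · intro h
    obtain ⟨s, t, rfl⟩ := List.append_of_mem h
    exact ⟨s, t, by simp⟩

lemma isIn_hash (s : String) : PySem.Str.isIn "#" s = s.toList.any (· == '#') := by
  rw [Bool.eq_iff_iff, PySem.Str.isIn_iff_infix]
  have : "#".toList = ['#'] := by decide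
  rw [this, singleton_infix]
  simp

-- B's outer loop produces A's empty-row list in its second component
lemma bGrid_rows (l : List String) : ∀ (s : Int) (st : BSt),
    ((PySem.List.enumerate l s).foldl bRow st).2.1
      = st.2.1 ++ ((PySem.List.enumerate l s).filter
          (fun p => !(PySem.Str.isIn "#" p.2))).map (fun p => p.1) := by
  induction l with
  | nil => intro s st; simp [PySem.List.enumerate_nil]
  | cons r rs ih =>
    intro s st
    simp only [PySem.List.enumerate_cons, List.foldl_cons, List.filter_cons]
    rw [ih]
    have hflag : (bRow st (s, r)).2.1
        = if PySem.Str.isIn "#" r then st.2.1 else st.2.1 ++ [s] := by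
      rw [bRow]
      simp only
      rw [bCell_foldl_snd, isIn_hash]
      simp
    by_cases h : PySem.Str.isIn "#" r = true
    · have h2 : PySem.Chars.isIn ['#'] r.toList = true := by simpa using h
      simp [hflag, h2]
    · simp only [Bool.not_eq_true] at h
      have h2 : PySem.Chars.isIn ['#'] r.toList = false := by simpa using h
      simp [hflag, h2]

-- membership in the comprehension {x for x, tile in enumerate(row) if tile != '#'}
lemma mem_bRowSet (row : List Char) (z : Int) :
    z ∈ bRowSet row ↔ ∃ (k : Nat) (_ : k < row.length), row[k] ≠ '#' ∧ z = (k : Int) := by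
  rw [bRowSet, PySem.List.foldl_ite_eq_foldl_filter,
      PySem.Set.mem_foldl_add (f := fun (q : Int × Char) => q.1)]
  simp only [PySem.Set.empty, List.not_mem_nil, false_or, List.mem_filter,
    PySem.List.mem_enumerate_iff]
  constructor
  · rintro ⟨q, ⟨⟨k, hk, rfl⟩, hq⟩, rfl⟩
    exact ⟨k, hk, by simpa using hq, by simp⟩
  · rintro ⟨k, hk, hne, rfl⟩
    exact ⟨((k : Int), row[k]), ⟨⟨k, hk, by simp⟩, by simpa using hne⟩, rfl⟩

-- the empty-column set after B's whole pass: membership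
lemma bGrid_C (l : List String) : ∀ (s : Int) (st : BSt) (z : Int),
    z ∈ ((PySem.List.enumerate l s).foldl bRow st).2.2
      ↔ z ∈ st.2.2 ∧ ∀ r ∈ l, z ∈ bRowSet r.toList := by
  induction l with
  | nil => intro s st z; simp [PySem.List.enumerate_nil]
  | cons r rs ih =>
    intro s st z
    simp only [PySem.List.enumerate_cons, List.foldl_cons]
    rw [ih]
    have : (bRow st (s, r)).2.2 = PySem.Set.inter st.2.2 (bRowSet r.toList) := rfl
    rw [this, PySem.Set.mem_inter]
    simp only [List.mem_cons]
    constructor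
    · rintro ⟨⟨h1, h2⟩, h3⟩
      exact ⟨h1, by rintro r' (rfl | hr'); exact h2; exact h3 r' hr'⟩
    · rintro ⟨h1, h2⟩
      exact ⟨⟨h1, h2 r (Or.inl rfl)⟩, fun r' hr' => h2 r' (Or.inr hr')⟩

-- the empty-column set after B's whole pass stays duplicate-free
lemma bGrid_nodup (l : List String) : ∀ (s : Int) (st : BSt), st.2.2.Nodup →
    ((PySem.List.enumerate l s).foldl bRow st).2.2.Nodup := by
  induction l with
  | nil => intro s st h; simpa [PySem.List.enumerate_nil] using h
  | cons r rs ih =>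
    intro s st h
    simp only [PySem.List.enumerate_cons, List.foldl_cons]
    exact ih _ _ (PySem.Set.nodup_inter _ _ h)

-- z is below the running minimum of row lengths iff it is below the start and below every row length
lemma lt_foldl_min (l : List (List Char)) : ∀ (a : Nat) (z : Int),
    (z < ((l.foldl (fun m r => min m r.length) a : Nat) : Int))
      ↔ z < (a : Int) ∧ ∀ r ∈ l, z < (r.length : Int) := by
  induction l with
  | nil => intro a z; simp
  | cons r rs ih =>
    intro a z
    simp only [List.foldl_cons, List.mem_cons]
    rw [ih]
    simp only [Nat.cast_min, lt_min_iff]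
    constructor
    · rintro ⟨⟨ha, hr⟩, h2⟩
      exact ⟨ha, by rintro r' (rfl | hr'); exact hr; exact h2 r' hr'⟩
    · rintro ⟨ha, h2⟩
      exact ⟨⟨ha, h2 r (Or.inl rfl)⟩, fun r' hr' => h2 r' (Or.inr hr')⟩

-- map-fst of a filter-on-snd over an index/value list is a filter on the index list
lemma map_fst_filter_snd {a : Type} (l : List Int) (f : Int -> a) (pred : a -> Bool) :
    (((l.map (fun j => (j, f j))).filter (fun p => pred p.2)).map fun p => p.1)
      = l.filter (fun j => pred (f j)) := by
  induction l with
  | nil => simp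
  | cons x xs ih =>
    simp only [List.map_cons, List.filter_cons]
    by_cases h : pred (f x) <;> simp [h, ih]

-- coordinates agree
lemma coords_eq (indata : List String) : (parse indata).1 = (parse_alt indata).1 := by
  simp only [parse, parse_alt]
  rw [bGrid_fst]

-- rows agree
lemma rows_eq (indata : List String) : (parse indata).2.1 = (parse_alt indata).2.1 := by
  simp only [parse, parse_alt]
  rw [bGrid_rows]
  rfl

-- cols agree
lemma cols_eq (indata : List String) : (parse indata).2.2 = (parse_alt indata).2.2 := by
  cases indata with
  | nil => rfl
  | cons r0 rest =>
    simp only [parse, parse_alt]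
    set E := ((PySem.List.enumerate (r0 :: rest) 0).foldl bRow
      ([], [], PySem.Set.ofList (PySem.List.pyRange 0 (PySem.Str.len r0) 1))).2.2 with hEdef
    set wN : Nat := (rest.map String.toList).foldl (fun m r => min m r.length) r0.toList.length with hwN
    have hzip : zipStar ((r0 :: rest).map String.toList)
        = (List.range wN).map (fun i => ((r0 :: rest).map String.toList).map (fun r => r.getD i ' ')) := by
      simp only [zipStar, List.map_cons]
      rfl
    rw [hzip]
    rw [PySem.List.enumerate_eq_map_pyRange (d := [])]
    have hlen : PySem.List.len ((List.range wN).map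
        (fun i => ((r0 :: rest).map String.toList).map (fun r => r.getD i ' '))) = (wN : Int) := by
      simp [PySem.List.len]
    rw [hlen]
    rw [map_fst_filter_snd (PySem.List.pyRange 0 (wN : Int) 1)
        (fun j => PySem.List.pyGetD ((List.range wN).map
          (fun i => ((r0 :: rest).map String.toList).map (fun r => r.getD i ' '))) j [])
        (fun col => !(col.contains '#'))]
    have hlen0 : PySem.Str.len r0 = (r0.toList.length : Int) := by simp [pysem]
    -- the filtered range list is strictly increasing and duplicate-free; E has the same members
    refine (PySem.List.sorted_eq_of_perm_of_pairwise_lt _ _ _ ?_ ?_).symm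
    · rw [List.perm_ext_iff_of_nodup
        ((PySem.List.nodup_pyRange_one 0 ((wN : Nat) : Int)).filter _)
        (hEdef ▸ bGrid_nodup (r0 :: rest) 0 _ (PySem.Set.nodup_ofList _))]
      intro z
      rw [List.mem_filter, PySem.List.mem_pyRange_one, hEdef, bGrid_C]
      have hmem0 : z ∈ PySem.Set.ofList (PySem.List.pyRange 0 (PySem.Str.len r0) 1)
          ↔ 0 ≤ z ∧ z < (r0.toList.length : Int) := by
        rw [PySem.Set.mem_ofList, PySem.List.mem_pyRange_one, hlen0]
      have hwiff := lt_foldl_min (rest.map String.toList) r0.toList.length z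
      rw [← hwN] at hwiff
      constructor
      · rintro ⟨⟨hz0, hzw⟩, hpred⟩
        have hltall : ∀ rl ∈ (r0 :: rest).map String.toList, z < (rl.length : Int) := by
          obtain ⟨h1, h2⟩ := hwiff.1 hzw
          intro rl hrl
          simp only [List.map_cons, List.mem_cons] at hrl
          rcases hrl with rfl | h
          · exact h1
          · exact h2 rl h
        have hget : PySem.List.pyGetD ((List.range wN).map
            (fun i => ((r0 :: rest).map String.toList).map (fun r => r.getD i ' '))) z []
            = ((r0 :: rest).map String.toList).map (fun r => r.getD z.toNat ' ') := by
          rw [PySem.List.pyGetD_of_nonneg _ _ hz0]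
          rw [List.getD_eq_getElem _ _ (by simpa using (by omega : z.toNat < wN))]
          simp
        rw [hget] at hpred
        have hpred' : ¬ '#' ∈ ((r0 :: rest).map String.toList).map (fun rl => rl.getD z.toNat ' ') := by
          simp only [Bool.not_eq_eq_eq_not, Bool.not_true, List.contains_eq_mem,
            decide_eq_false_iff_not] at hpred
          exact hpred
        have hnh : ∀ r ∈ r0 :: rest, r.toList.getD z.toNat ' ' ≠ '#' := by
          intro r hr hc
          exact hpred' (List.mem_map.2 ⟨r.toList, List.mem_map.2 ⟨r, hr, rfl⟩, hc⟩)
        refine ⟨hmem0.2 ⟨hz0, ?_⟩, ?_⟩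
        · exact hltall r0.toList (by simp)
        · intro r hr
          rw [mem_bRowSet]
          have hlt : z.toNat < r.toList.length := by
            have := hltall r.toList (List.mem_map.2 ⟨r, hr, rfl⟩)
            omega
          refine ⟨z.toNat, hlt, ?_, by omega⟩
          have := hnh r hr
          rwa [List.getD_eq_getElem _ _ hlt] at this
      · rintro ⟨h0, hall⟩
        obtain ⟨hz0, hzr0⟩ := hmem0.1 h0
        have hbound : ∀ r ∈ r0 :: rest, ∃ (hlt : z.toNat < r.toList.length), r.toList[z.toNat] ≠ '#' := by
          intro r hr
          obtain ⟨k, hk, hne, hzk⟩ := (mem_bRowSet r.toList z).1 (hall r hr)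
          have hzn : z.toNat = k := by omega
          subst hzn
          exact ⟨hk, hne⟩
        have hzw : z < ((wN : Nat) : Int) := by
          apply hwiff.2
          refine ⟨hzr0, ?_⟩
          intro rl hrl
          obtain ⟨r, hr, rfl⟩ := List.mem_map.1 hrl
          obtain ⟨hlt, -⟩ := hbound r (List.mem_cons_of_mem _ hr)
          omega
        have hget : PySem.List.pyGetD ((List.range wN).map
            (fun i => ((r0 :: rest).map String.toList).map (fun r => r.getD i ' '))) z []
            = ((r0 :: rest).map String.toList).map (fun r => r.getD z.toNat ' ') := by
          rw [PySem.List.pyGetD_of_nonneg _ _ hz0]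
          rw [List.getD_eq_getElem _ _ (by simpa using (by omega : z.toNat < wN))]
          simp
        refine ⟨⟨hz0, hzw⟩, ?_⟩
        rw [hget]
        simp only [Bool.not_eq_eq_eq_not, Bool.not_true, List.contains_eq_mem,
          decide_eq_false_iff_not]
        intro hmem
        rw [List.mem_map] at hmem
        obtain ⟨rl, hrl, hc⟩ := hmem
        obtain ⟨r, hr, rfl⟩ := List.mem_map.1 hrl
        obtain ⟨hlt, hne⟩ := hbound r hr
        rw [List.getD_eq_getElem _ _ hlt] at hc
        exact hne hc
    · exact (PySem.List.pairwise_lt_pyRange_one 0 ((wN : Nat) : Int)).filter _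

-- ===== VERDICT (by name: the statement is the Claim_ definition above) =====
theorem parse_spec : Claim_equal_parse := by
  intro indata _
  show parse indata = parse_alt indata
  exact Prod.ext (coords_eq indata) (Prod.ext (rows_eq indata) (cols_eq indata))
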